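-- pv_equiv track=rewrite | github.com/asadovsky/nn | atis_yvchen.py | _proc_tokens
-- ===== SOURCE A (Python) =====
-- UNK = "<unk>"
--
-- def _proc_tokens(tokens, token2id, update_token2id):
--   token_ids = []
--   for token in tokens:
--     if token not in token2id:
--       if update_token2id:
--         token2id[token] = len(token2id)
--       else:
--         token = UNK
--     token_ids.append(token2id[token])
--   return token_ids
-- ===== SOURCE B (Python) =====
-- UNK = "<unk>"
--
-- def _proc_tokens(tokens, token2id, update_token2id):
--   if update_token2id:
--     # Assign ids to new tokens in closed form: dedupe, drop known ones,
--     # then bulk-insert with consecutive ids starting at the current size.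
--     fresh = [t for t in dict.fromkeys(tokens) if t not in token2id]
--     token2id.update(zip(fresh, range(len(token2id), len(token2id) + len(fresh))))
--     return [token2id[t] for t in tokens]
--   return [token2id[t if t in token2id else UNK] for t in tokens]
-- ===== Notes on version B (the rewrite author's own statement) =====
-- stated objective: alternative
-- what changed: B replaces A's single loop (which interleaves per-token membership tests, incremental len(dict)-valued insertion and appends) by a closed-form vocabulary extension: in update mode it dedupes the tokens via dict.fromkeys, filters out known ones, and bulk-inserts them with consecutive ids computed arithmetically via zip(fresh, range(base, base+len(fresh))), then maps tokens through the finished dict; in non-update mode a plain comprehension with UNK substitution.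
import Mathlib
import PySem

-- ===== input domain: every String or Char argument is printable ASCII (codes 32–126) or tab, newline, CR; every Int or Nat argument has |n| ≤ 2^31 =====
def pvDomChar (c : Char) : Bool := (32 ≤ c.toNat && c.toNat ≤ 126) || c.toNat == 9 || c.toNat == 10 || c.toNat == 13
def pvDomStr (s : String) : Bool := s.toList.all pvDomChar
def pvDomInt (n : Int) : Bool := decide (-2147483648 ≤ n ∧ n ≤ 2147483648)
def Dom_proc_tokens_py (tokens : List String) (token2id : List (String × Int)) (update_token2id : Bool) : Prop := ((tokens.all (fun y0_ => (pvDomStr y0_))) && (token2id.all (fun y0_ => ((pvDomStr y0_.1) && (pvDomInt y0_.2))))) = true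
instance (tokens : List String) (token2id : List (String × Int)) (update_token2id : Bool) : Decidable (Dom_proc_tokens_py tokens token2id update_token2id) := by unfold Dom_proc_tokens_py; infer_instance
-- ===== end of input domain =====

-- B replaces A's interleaved loop by a closed-form vocabulary extension (dedup + filter +
-- bulk insert with ids from an arithmetic range) followed by a pure lookup pass; the claim
-- is about the RETURN value (both mutate token2id identically in update mode).

-- ===== PORT A =====
-- literal transliteration of A's single loop: state = (token2id, token_ids)
def proc_tokens_py (tokens : List String) (token2id : List (String × Int)) (update_token2id : Bool) : List Int :=
  (tokens.foldl
    (fun (st : PySem.Dict String Int × List Int) token =>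
      let d := st.1
      if d.contains token = false then
        if update_token2id then
          let d' := d.insert token (d.size : Int)
          (d', st.2 ++ [d'.getD token 0])      -- token2id[token] just inserted; getD safe under Pre_
        else
          (d, st.2 ++ [d.getD "<unk>" 0])      -- token = UNK; KeyError (excluded by Pre_) if UNK absent
      else
        (d, st.2 ++ [d.getD token 0]))
    (PySem.Dict.ofList token2id, [])).2

-- ===== PORT B =====
def proc_tokens_py_alt (tokens : List String) (token2id : List (String × Int)) (update_token2id : Bool) : List Int :=
  let d0 := PySem.Dict.ofList token2id
  if update_token2id then
    -- fresh = [t for t in dict.fromkeys(tokens) if t not in token2id]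
    let fresh := (PySem.List.dedup tokens).filter (fun t => !d0.contains t)
    -- token2id.update(zip(fresh, range(base, base + len(fresh))))
    let base : Int := (d0.size : Int)
    let d := d0.update (fresh.zip (PySem.List.pyRange base (base + fresh.length)))
    tokens.map (fun t => d.getD t 0)
  else
    tokens.map (fun t => d0.getD (if d0.contains t then t else "<unk>") 0)

-- ===== PRECONDITION & SPEC =====
-- Pre_ excludes exactly the inputs where Python A raises KeyError: non-update mode with a token
-- missing from token2id while "<unk>" is also missing (B raises there too).
def Pre_proc_tokens_py (tokens : List String) (token2id : List (String × Int)) (update_token2id : Bool) : Prop :=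
  update_token2id = true ∨
  (PySem.Dict.ofList token2id).contains "<unk>" = true ∨
  ∀ t ∈ tokens, (PySem.Dict.ofList token2id).contains t = true
instance (tokens : List String) (token2id : List (String × Int)) (update_token2id : Bool) : Decidable (Pre_proc_tokens_py tokens token2id update_token2id) := by unfold Pre_proc_tokens_py; infer_instance

def pvWitness_proc_tokens_py : List String × (List (String × Int)) × Bool :=
  (["a", "x"], [("a", 0), ("<unk>", 1)], false)

def Spec_proc_tokens_py (tokens : List String) (token2id : List (String × Int)) (update_token2id : Bool) (out : List Int) : Prop := out = proc_tokens_py_alt tokens token2id update_token2id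
instance (tokens : List String) (token2id : List (String × Int)) (update_token2id : Bool) (out : List Int) : Decidable (Spec_proc_tokens_py tokens token2id update_token2id out) := by unfold Spec_proc_tokens_py; infer_instance

-- ===== CLAIM (what is proved, stated in full; the proofs are below) =====
def Claim_equal_proc_tokens_py : Prop := ∀ (tokens : List String) (token2id : List (String × Int)) (update_token2id : Bool), Dom_proc_tokens_py tokens token2id update_token2id → Pre_proc_tokens_py tokens token2id update_token2id → Spec_proc_tokens_py tokens token2id update_token2id (proc_tokens_py tokens token2id update_token2id)

-- ===== LEMMAS AND PROOFS =====

-- A's update-mode loop, dict component abstracted: pass1-style incremental insertion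
def pvPass1 (ts : List String) (d : PySem.Dict String Int) : PySem.Dict String Int :=
  ts.foldl (fun d t => if d.contains t then d else d.insert t (d.size : Int)) d

theorem pvPass1_getD (ts : List String) (d : PySem.Dict String Int) (t : String)
    (h : d.contains t = true) : (pvPass1 ts d).getD t 0 = d.getD t 0 := by
  induction ts generalizing d with
  | nil => rfl
  | cons t' ts ih =>
    simp only [pvPass1, List.foldl_cons] at *
    split
    · exact ih d h
    · rename_i hc
      rw [ih _ (by rw [PySem.Dict.contains_insert]; simp [h])]
      rw [PySem.Dict.getD_insert]
      have : t ≠ t' := fun he => by rw [he] at h; simp [h] at hc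
      simp [this]

-- A's loop in update mode = pass1 followed by lookups in the final dict
theorem pvA_update (ts : List String) (d : PySem.Dict String Int) (acc : List Int) :
    (ts.foldl
      (fun (st : PySem.Dict String Int × List Int) token =>
        let d := st.1
        if d.contains token = false then
          let d' := d.insert token (d.size : Int)
          (d', st.2 ++ [d'.getD token 0])
        else
          (d, st.2 ++ [d.getD token 0]))
      (d, acc)).2 = acc ++ ts.map (fun t => (pvPass1 ts d).getD t 0) := by
  induction ts generalizing d acc with
  | nil => simp
  | cons t ts ih =>
    simp only [List.foldl_cons, List.map_cons]
    by_cases hc : d.contains t = true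
    · have h1 : pvPass1 (t :: ts) d = pvPass1 ts d := by simp [pvPass1, hc]
      rw [h1]
      simp only [hc, Bool.true_eq_false, if_false]
      rw [ih d, pvPass1_getD ts d t hc]
      simp
    · simp only [Bool.not_eq_true] at hc
      have h1 : pvPass1 (t :: ts) d = pvPass1 ts (d.insert t (d.size : Int)) := by
        simp [pvPass1, hc]
      rw [h1]
      simp only [hc, if_true]
      rw [ih, pvPass1_getD ts _ t (PySem.Dict.contains_insert_self d t _)]
      simp

-- A's loop in non-update mode = a plain lookup pass (the dict never changes)
theorem pvA_noupdate (ts : List String) (d : PySem.Dict String Int) (acc : List Int) :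
    (ts.foldl
      (fun (st : PySem.Dict String Int × List Int) token =>
        let d := st.1
        if d.contains token = false then
          (d, st.2 ++ [d.getD "<unk>" 0])
        else
          (d, st.2 ++ [d.getD token 0]))
      (d, acc)).2 = acc ++ ts.map (fun t => d.getD (if d.contains t then t else "<unk>") 0) := by
  induction ts generalizing acc with
  | nil => simp
  | cons t ts ih =>
    simp only [List.foldl_cons, List.map_cons]
    by_cases hc : d.contains t = true
    · simp only [hc, Bool.true_eq_false, if_false, if_true]
      rw [ih]; simp
    · simp only [Bool.not_eq_true] at hc
      simp only [hc, if_true]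
      rw [ih]; simp

-- set(...) insertion as dedup-filter: fold of Set.add appends the unseen elements, deduped, in order
theorem pvFoldlAdd (ts : List String) (s : PySem.Set String) :
    ts.foldl PySem.Set.add s = s ++ (PySem.List.dedup ts).filter (fun x => !s.contains x) := by
  induction ts generalizing s with
  | nil => simp [PySem.List.dedup]
  | cons t ts ih =>
    have hded : PySem.List.dedup (t :: ts) = PySem.Set.add [] t ++
        (PySem.List.dedup ts).filter (fun x => !(PySem.Set.add ([] : PySem.Set String) t).contains x) := by
      show List.foldl PySem.Set.add (PySem.Set.add [] t) ts = _
      exact ih _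
    have haddnil : PySem.Set.add ([] : PySem.Set String) t = [t] := rfl
    simp only [List.foldl_cons]
    rw [ih (PySem.Set.add s t), hded, haddnil]
    by_cases hc : s.contains t = true
    · have hmem : t ∈ s := by simpa using hc
      have hadd : PySem.Set.add s t = s := by simp [PySem.Set.add, PySem.Set.contains, hmem]
      rw [hadd]
      simp only [List.filter_append, List.filter_filter]
      have h1 : List.filter (fun x => !PySem.Set.contains s x) [t] = [] := by
        simp [PySem.Set.contains, hmem]
      rw [h1, List.nil_append]
      congr 1
      apply List.filter_congr
      intro x _
      by_cases hx : x ∈ s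
      · simp [PySem.Set.contains, hx]
      · have hxt : ¬ (x = t) := fun he => hx (he ▸ hmem)
        simp [PySem.Set.contains, hx, hxt]
    · simp only [Bool.not_eq_true] at hc
      have hmem : t ∉ s := by simpa using hc
      have hadd : PySem.Set.add s t = s ++ [t] := by simp [PySem.Set.add, PySem.Set.contains, hmem]
      rw [hadd]
      have h1 : List.filter (fun x => !PySem.Set.contains s x) [t] = [t] := by
        simp [PySem.Set.contains, hmem]
      simp only [List.filter_append, List.filter_filter, h1, List.append_assoc]
      congr 2
      apply List.filter_congr
      intro x _
      simp [PySem.Set.contains, Bool.and_comm]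

-- dedup of a cons
theorem pvDedupCons (t : String) (ts : List String) :
    PySem.List.dedup (t :: ts) = t :: (PySem.List.dedup ts).filter (fun x => !(x == t)) := by
  have h : PySem.List.dedup (t :: ts) = List.foldl PySem.Set.add (PySem.Set.add [] t) ts := rfl
  rw [h, pvFoldlAdd]
  rw [show PySem.Set.add ([] : PySem.Set String) t = [t] from rfl]
  simp only [List.cons_append, List.nil_append]
  congr 1
  apply List.filter_congr
  intro x _
  simp only [PySem.Set.contains, List.contains_cons, List.elem_nil, Bool.or_false]

-- when t is already present, the extra ≠ t filter is redundant among unknown tokens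
theorem pvFilterDrop (d : PySem.Dict String Int) (t : String) (hc : d.contains t = true)
    (l : List String) :
    List.filter (fun a => !d.contains a && !(a == t)) l = List.filter (fun a => !d.contains a) l := by
  apply List.filter_congr
  intro x _
  by_cases hx : d.contains x = true
  · simp [hx]
  · have hxt : ¬ (x = t) := by
      intro he; rw [he, hc] at hx; exact hx rfl
    simp [hx, hxt]

-- pass1's incremental insertion = bulk insertion of the fresh (deduped, unknown) tokens
-- with consecutive ids from an arithmetic range
theorem pvPass1_eq_bulk (ts : List String) (d : PySem.Dict String Int) :
    pvPass1 ts d =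
      d.update (((PySem.List.dedup ts).filter (fun t => !d.contains t)).zip
        (PySem.List.pyRange (d.size : Int) ((d.size : Int) + ((PySem.List.dedup ts).filter (fun t => !d.contains t)).length))) := by
  induction ts generalizing d with
  | nil => rfl
  | cons t ts ih =>
    have hcons : pvPass1 (t :: ts) d =
        pvPass1 ts (if d.contains t then d else d.insert t (d.size : Int)) := rfl
    rw [hcons, pvDedupCons]
    by_cases hc : d.contains t = true
    · simp only [hc, if_true, List.filter_cons]
      rw [if_neg (by simp), List.filter_filter, pvFilterDrop d t hc]
      exact ih d
    · simp only [Bool.not_eq_true] at hc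
      simp only [hc, Bool.false_eq_true, if_false, List.filter_cons]
      rw [if_pos (by simp)]
      set d' := d.insert t (d.size : Int) with hd'
      have htail : List.filter (fun x => !d.contains x) (List.filter (fun x => !(x == t)) (PySem.List.dedup ts))
          = List.filter (fun x => !d'.contains x) (PySem.List.dedup ts) := by
        rw [List.filter_filter]
        apply List.filter_congr
        intro x _
        rw [hd', PySem.Dict.contains_insert]
        simp [Bool.and_comm]
      have hsize : (d'.size : Int) = (d.size : Int) + 1 := by
        rw [hd', PySem.Dict.size_insert, if_neg (by simp [hc])]
        push_cast; ring
      rw [htail]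
      set L := List.filter (fun x => !d'.contains x) (PySem.List.dedup ts) with hL
      have hlenpos : (0:Int) < ((t :: L).length : Int) := by
        exact_mod_cast Nat.succ_pos L.length
      have hrange : PySem.List.pyRange (d.size : Int) ((d.size : Int) + ((t :: L).length : Int))
          = (d.size : Int) :: PySem.List.pyRange ((d.size : Int) + 1) ((d.size : Int) + ((t :: L).length : Int)) := by
        apply PySem.List.pyRange_one_cons
        omega
      rw [hrange, List.zip_cons_cons]
      have hupd : d.update ((t, (d.size : Int)) :: L.zip (PySem.List.pyRange ((d.size : Int) + 1) ((d.size : Int) + ((t :: L).length : Int))))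
          = d'.update (L.zip (PySem.List.pyRange ((d.size : Int) + 1) ((d.size : Int) + ((t :: L).length : Int)))) := rfl
      rw [hupd]
      have hlen : ((t :: L).length : Int) = (L.length : Int) + 1 := by
        push_cast [List.length_cons]; ring
      have harg : (d.size : Int) + ((t :: L).length : Int) = (d'.size : Int) + (L.length : Int) := by
        rw [hsize, hlen]; ring
      rw [harg, ← hsize]
      exact ih d'

-- ===== VERDICT (by name: the statement is the Claim_ definition above) =====
theorem proc_tokens_py_spec : Claim_equal_proc_tokens_py := by
  intro tokens token2id update_token2id _ _
  unfold Spec_proc_tokens_py proc_tokens_py proc_tokens_py_alt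
  cases update_token2id with
  | false =>
    refine (pvA_noupdate tokens (PySem.Dict.ofList token2id) []).trans ?_
    simp
  | true =>
    refine (pvA_update tokens (PySem.Dict.ofList token2id) []).trans ?_
    simp only [List.nil_append, if_true]
    rw [pvPass1_eq_bulk]
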